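-- pv_equiv track=rewrite | github.com/codingsteward/etudes | atcoder/abc/42/task_d.py | powproduct
-- ===== SOURCE A (Python) =====
-- def powproduct(ns):
--     """Compute the explicit value of a factored integer
--     given as a list of (base, exponent) pairs."""
--     if not ns:
--         return 1
--     units = 1
--     multi = []
--     for base, exp in ns:
--         if exp == 0:
--             continue
--         elif exp == 1:
--             units *= base
--         else:
--             if exp % 2:
--                 units *= base
--             multi.append((base, exp//2))
--     return units * powproduct(multi)**2
-- ===== SOURCE B (Python) =====
-- def powproduct(ns):
--     """Compute the explicit value of a factored integer
--     given as a list of (base, exponent) pairs."""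
--     result = 1
--     for base, exp in ns:
--         result *= base ** exp
--     return result
-- ===== Notes on version B (the rewrite author's own statement) =====
-- stated objective: simpler
-- what changed: Replaced the recursive exponent-halving scheme (odd-factor accumulator 'units' plus recursion on the halved 'multi' list, squared) by a single flat pass that multiplies base**exp for each pair directly.
-- outside the precondition, e.g. on powproduct([(2, -1)]): A raises RecursionError, B returns 0.5
import Mathlib
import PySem

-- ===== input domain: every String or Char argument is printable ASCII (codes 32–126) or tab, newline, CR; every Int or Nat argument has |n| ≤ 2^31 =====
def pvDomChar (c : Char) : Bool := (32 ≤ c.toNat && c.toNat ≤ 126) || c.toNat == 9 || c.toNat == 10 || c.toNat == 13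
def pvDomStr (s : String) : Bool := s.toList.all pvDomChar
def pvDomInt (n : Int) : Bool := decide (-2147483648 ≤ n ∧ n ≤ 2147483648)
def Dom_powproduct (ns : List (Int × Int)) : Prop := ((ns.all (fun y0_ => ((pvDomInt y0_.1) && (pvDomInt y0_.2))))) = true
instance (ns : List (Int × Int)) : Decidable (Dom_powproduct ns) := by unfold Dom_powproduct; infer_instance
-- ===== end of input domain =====

-- B replaces A's recursive exponent-halving scheme by one flat pass multiplying base^exp per pair: simpler.


-- ===== PORT A =====
-- fuel bound for A's recursion: the recursive call's list has a strictly smaller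
-- exponent sum (exponents are halved), so (sum of |exp|) + 1 levels always suffice on Pre_.
def pvSumExp : List (Int × Int) → Nat
  | [] => 0
  | p :: l => p.2.natAbs + pvSumExp l

-- one iteration of A's for-loop on the state (units, multi)
def pvStepA (st : Int × List (Int × Int)) (p : Int × Int) : Int × List (Int × Int) :=
  if p.2 = 0 then st
  else if p.2 = 1 then (st.1 * p.1, st.2)
  else
    let st1 := if PySem.Int.mod p.2 2 ≠ 0 then (st.1 * p.1, st.2) else st
    (st1.1, st1.2 ++ [(p.1, PySem.Int.floordiv p.2 2)])

def powproductGo : Nat → List (Int × Int) → Int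
  | 0, _ => 1        -- fuel exhausted; unreachable under Pre_powproduct
  | fuel + 1, ns =>
    if ns = [] then 1
    else
      let st := ns.foldl pvStepA (1, [])
      st.1 * (powproductGo fuel st.2) ^ 2

def powproduct (ns : List (Int × Int)) : Int := powproductGo (pvSumExp ns + 1) ns

-- ===== PORT B =====
-- Source B: result = 1; for base, exp in ns: result *= base ** exp  (exp ≥ 0 on Pre_)
def powproduct_alt (ns : List (Int × Int)) : Int :=
  ns.foldl (fun result p => result * p.1 ^ p.2.toNat) 1

-- ===== PRECONDITION & SPEC =====
-- Pre_ excludes negative exponents: there A recurses forever (RecursionError) and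
-- B's '**' leaves the integers (returns a float or raises ZeroDivisionError).
def Pre_powproduct (ns : List (Int × Int)) : Prop := ∀ p ∈ ns, 0 ≤ p.2
instance (ns : List (Int × Int)) : Decidable (Pre_powproduct ns) := by unfold Pre_powproduct; infer_instance
def pvWitness_powproduct : (List (Int × Int)) := [(2, 10), (3, 0), (-5, 3)]

def Spec_powproduct (ns : List (Int × Int)) (out : Int) : Prop := out = powproduct_alt ns
instance (ns : List (Int × Int)) (out : Int) : Decidable (Spec_powproduct ns out) := by unfold Spec_powproduct; infer_instance

-- ===== CLAIM (what is proved, stated in full; the proofs are below) =====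
def Claim_equal_powproduct : Prop := ∀ (ns : List (Int × Int)), Dom_powproduct ns → Pre_powproduct ns → Spec_powproduct ns (powproduct ns)

-- ===== LEMMAS AND PROOFS =====

theorem mod2_eq (a : Int) : PySem.Int.mod a 2 = a % 2 :=
  PySem.Int.mod_eq_emod_of_pos (by norm_num)

theorem fdiv2_eq (a : Int) : PySem.Int.floordiv a 2 = a / 2 :=
  PySem.Int.floordiv_eq_ediv_of_pos (by norm_num)

-- recursive product of base^exp pairs
def prodPairs : List (Int × Int) → Int
  | [] => 1
  | p :: l => p.1 ^ p.2.toNat * prodPairs l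

theorem prodPairs_append (l : List (Int × Int)) (x : Int × Int) :
    prodPairs (l ++ [x]) = prodPairs l * x.1 ^ x.2.toNat := by
  induction l with
  | nil => simp [prodPairs]
  | cons q t iht => simp [prodPairs, iht]; ring

theorem alt_foldl (ns : List (Int × Int)) (a : Int) :
    ns.foldl (fun result p => result * p.1 ^ p.2.toNat) a = a * prodPairs ns := by
  induction ns generalizing a with
  | nil => simp [prodPairs]
  | cons p l ih => simp [List.foldl, prodPairs, ih]; ring

theorem alt_eq_prodPairs (ns : List (Int × Int)) : powproduct_alt ns = prodPairs ns := by
  simp [powproduct_alt, alt_foldl]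

theorem pvStepA_eq (st : Int × List (Int × Int)) (p : Int × Int) :
    pvStepA st p =
      if p.2 = 0 then st
      else if p.2 = 1 then (st.1 * p.1, st.2)
      else if p.2 % 2 = 1 then (st.1 * p.1, st.2 ++ [(p.1, p.2 / 2)])
      else (st.1, st.2 ++ [(p.1, p.2 / 2)]) := by
  simp only [pvStepA, mod2_eq, fdiv2_eq]
  split_ifs with h0 h1 hodd hodd' <;> simp_all <;> omega

-- the multi list A's loop builds, as a filterMap (independent of units)
def multiOf (ns : List (Int × Int)) : List (Int × Int) :=
  ns.filterMap (fun p => if p.2 = 0 ∨ p.2 = 1 then none else some (p.1, p.2 / 2))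

theorem loop_snd (ns : List (Int × Int)) (u : Int) (m : List (Int × Int)) :
    (ns.foldl pvStepA (u, m)).2 = m ++ multiOf ns := by
  induction ns generalizing u m with
  | nil => simp [multiOf]
  | cons p l ih =>
    simp only [List.foldl, multiOf, List.filterMap_cons, pvStepA_eq]
    by_cases h0 : p.2 = 0
    · simp [h0, ih, multiOf]
    · by_cases h1 : p.2 = 1
      · simp [h0, h1, ih, multiOf]
      · by_cases hodd : p.2 % 2 = 1 <;>
          simp [h0, h1, hodd, ih, multiOf]

theorem pow_split (b : Int) {e : Int} (he : 0 ≤ e) :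
    b ^ e.toNat = (if e % 2 = 1 then b else 1) * (b ^ (e / 2).toNat) ^ 2 := by
  have h2 : (e / 2).toNat = e.toNat / 2 := by omega
  have h3 : e.toNat = 2 * (e.toNat / 2) + e.toNat % 2 := by omega
  have h4 : e % 2 = (e.toNat % 2 : Nat) := by omega
  rw [h2, ← pow_mul, h4]
  by_cases hp : e.toNat % 2 = 0
  · simp [hp]
    conv_lhs => rw [h3, hp]
    ring
  · have hp1 : e.toNat % 2 = 1 := by omega
    simp [hp1]
    conv_lhs => rw [h3, hp1]
    rw [pow_succ]; ring

-- loop invariant for A's for-loop: units · prodPairs(multi)² accumulates prodPairs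
theorem loop_inv (ns : List (Int × Int)) (u : Int) (m : List (Int × Int))
    (h : ∀ p ∈ ns, 0 ≤ p.2) :
    (ns.foldl pvStepA (u, m)).1 * (prodPairs (ns.foldl pvStepA (u, m)).2) ^ 2
      = u * (prodPairs m) ^ 2 * prodPairs ns := by
  induction ns generalizing u m with
  | nil => simp [prodPairs]
  | cons p l ih =>
    have hp : 0 ≤ p.2 := h p (by simp)
    have hl : ∀ q ∈ l, 0 ≤ q.2 := fun q hq => h q (by simp [hq])
    simp only [List.foldl, pvStepA_eq]
    by_cases h0 : p.2 = 0
    · simp only [h0, if_pos]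
      rw [ih u m hl]; simp [prodPairs, h0]
    · by_cases h1 : p.2 = 1
      · simp only [h0, h1, if_neg, if_pos, not_false_iff]
        rw [ih _ _ hl]; simp [prodPairs, h1]; ring
      · have hsplit := pow_split p.1 hp
        by_cases hodd : p.2 % 2 = 1
        · simp only [h0, h1, hodd, if_neg, if_pos, not_false_iff]
          rw [ih _ _ hl, prodPairs_append]
          simp only [prodPairs, hsplit, hodd, if_pos]
          ring
        · simp only [h0, h1, hodd, if_neg, not_false_iff]
          rw [ih _ _ hl, prodPairs_append]
          simp only [prodPairs, hsplit, hodd, if_neg, not_false_iff]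
          ring

theorem multiOf_nonneg (ns : List (Int × Int)) (h : ∀ p ∈ ns, 0 ≤ p.2) :
    ∀ q ∈ multiOf ns, 0 ≤ q.2 := by
  intro q hq
  simp only [multiOf, List.mem_filterMap] at hq
  obtain ⟨p, hp, hpq⟩ := hq
  split at hpq
  · exact absurd hpq (by simp)
  · cases hpq
    have := h p hp
    simp only
    omega

theorem multiOf_sum_lt (ns : List (Int × Int)) (h : ∀ p ∈ ns, 0 ≤ p.2) :
    multiOf ns = [] ∨ pvSumExp (multiOf ns) < pvSumExp ns := by
  induction ns with
  | nil => left; rfl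
  | cons p l ih =>
    have hp : 0 ≤ p.2 := h p (by simp)
    have hl := ih (fun q hq => h q (by simp [hq]))
    simp only [multiOf, List.filterMap_cons]
    by_cases h01 : p.2 = 0 ∨ p.2 = 1
    · simp only [h01, if_pos]
      rcases hl with he | hlt
      · left; exact he
      · right; simp only [pvSumExp, multiOf] at *; omega
    · simp only [h01, if_neg, not_false_iff]
      right
      have hkey : (p.2 / 2).natAbs < p.2.natAbs := by omega
      have : pvSumExp (multiOf l) ≤ pvSumExp l := by
        rcases hl with he | hlt
        · simp [he, pvSumExp]
        · omega
      simp only [pvSumExp, multiOf] at *; omega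

theorem go_eq (fuel : Nat) : ∀ ns : List (Int × Int), (∀ p ∈ ns, 0 ≤ p.2) →
    pvSumExp ns ≤ fuel → powproductGo (fuel + 1) ns = prodPairs ns := by
  induction fuel with
  | zero =>
    intro ns h hs
    rw [powproductGo]
    by_cases hns : ns = []
    · simp [hns, prodPairs]
    · simp only [hns, if_neg, not_false_iff]
      have hm : multiOf ns = [] := by
        rcases multiOf_sum_lt ns h with he | hlt
        · exact he
        · omega
      have := loop_inv ns 1 [] h
      rw [show ((ns.foldl pvStepA (1, [])).2) = multiOf ns from by simpa using loop_snd ns 1 []] at this ⊢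
      rw [hm] at this ⊢
      simp only [prodPairs] at this ⊢
      simpa [powproductGo] using this
  | succ f ih =>
    intro ns h hs
    rw [powproductGo]
    by_cases hns : ns = []
    · simp [hns, prodPairs]
    · simp only [hns, if_neg, not_false_iff]
      have hsnd : ((ns.foldl pvStepA (1, [])).2) = multiOf ns := by
        simpa using loop_snd ns 1 []
      have hrec : powproductGo (f + 1) (multiOf ns) = prodPairs (multiOf ns) := by
        rcases multiOf_sum_lt ns h with he | hlt
        · rw [he, powproductGo]; simp [prodPairs]
        · exact ih (multiOf ns) (multiOf_nonneg ns h) (by omega)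
      have := loop_inv ns 1 [] h
      rw [hsnd] at this ⊢
      rw [hrec]
      simpa [prodPairs] using this

-- ===== VERDICT (by name: the statement is the Claim_ definition above) =====
theorem powproduct_spec : Claim_equal_powproduct := by
  intro ns _ hpre
  unfold Spec_powproduct powproduct
  rw [alt_eq_prodPairs, go_eq (pvSumExp ns) ns hpre (by omega)]
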